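-- pv_equiv track=rewrite | github.com/Sasank-ProfessionalSeminar/Gayam_Sasank_COMP_699_C | app.py | calculate_risk_score
-- ===== SOURCE A (Python) =====
-- def calculate_risk_score(differences):
--     score = 0
--     for diff in differences:
--         if diff["type"] == "added" and "user" in diff["key"].lower():
--             score += 30
--         elif diff["type"] == "removed" and "patch" in diff["key"].lower():
--             score += 50
--         elif diff["type"] == "modified" and "port" in diff["key"].lower():
--             score += 20
--     return min(score, 100)
-- ===== SOURCE B (Python) =====
-- RISK_RULES = [("added", "user", 30), ("removed", "patch", 50), ("modified", "port", 20)]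
--
--
-- def _matches(diff, rtype, keyword):
--     return diff["type"] == rtype and keyword in diff["key"].lower()
--
--
-- def calculate_risk_score(differences):
--     score = sum(
--         points * sum(1 for diff in differences if _matches(diff, rtype, keyword))
--         for rtype, keyword, points in RISK_RULES
--     )
--     return min(score, 100)
-- ===== Notes on version B (the rewrite author's own statement) =====
-- stated objective: alternative
-- what changed: Instead of one pass with an elif chain accumulating per diff, B makes one counting pass per scoring rule (rule-major order) and returns the weighted sum of the three match counts, capped at 100; since the rule types are pairwise distinct at most one rule matches a diff, so the totals agree.
import Mathlib
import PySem

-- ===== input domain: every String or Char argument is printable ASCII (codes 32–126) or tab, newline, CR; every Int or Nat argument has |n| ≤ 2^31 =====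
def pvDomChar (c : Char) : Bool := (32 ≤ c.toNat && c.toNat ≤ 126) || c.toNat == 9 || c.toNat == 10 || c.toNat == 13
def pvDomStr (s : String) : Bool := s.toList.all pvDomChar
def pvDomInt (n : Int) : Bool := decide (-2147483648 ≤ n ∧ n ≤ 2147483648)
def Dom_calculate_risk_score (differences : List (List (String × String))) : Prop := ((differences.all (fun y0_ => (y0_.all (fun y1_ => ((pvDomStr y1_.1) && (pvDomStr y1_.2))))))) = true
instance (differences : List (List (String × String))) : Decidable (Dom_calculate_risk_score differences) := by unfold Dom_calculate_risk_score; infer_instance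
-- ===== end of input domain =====

-- B replaces A's single elif-chain pass with one counting pass per scoring rule and a weighted
-- sum of the three counts (alternative decomposition; same cost).

-- ===== PORT A =====
def calculate_risk_score (differences : List (List (String × String))) : Int :=
  let score := differences.foldl (fun score diff =>
    let d := PySem.Dict.mk diff
    if d.getD "type" "" == "added" && PySem.Str.isIn "user" (PySem.Str.lower (d.getD "key" "")) then
      score + 30
    else if d.getD "type" "" == "removed" && PySem.Str.isIn "patch" (PySem.Str.lower (d.getD "key" "")) then
      score + 50
    else if d.getD "type" "" == "modified" && PySem.Str.isIn "port" (PySem.Str.lower (d.getD "key" "")) then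
      score + 20
    else score) 0
  min score 100

-- ===== PORT B =====
def pvRiskRules : List (String × String × Int) :=
  [("added", "user", 30), ("removed", "patch", 50), ("modified", "port", 20)]

def pvMatches (diff : List (String × String)) (rtype keyword : String) : Bool :=
  let d := PySem.Dict.mk diff
  d.getD "type" "" == rtype && PySem.Str.isIn keyword (PySem.Str.lower (d.getD "key" ""))

def calculate_risk_score_alt (differences : List (List (String × String))) : Int :=
  let score := (pvRiskRules.map (fun r =>
    r.2.2 * (differences.foldl (fun c diff => if pvMatches diff r.1 r.2.1 then c + 1 else c) (0 : Int)))).sum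
  min score 100

-- ===== PRECONDITION & SPEC =====
-- Pre_ excludes exactly the inputs where Python A raises KeyError: a diff without a "type" key,
-- or a diff whose type is one of the three scored types but which has no "key" key.
def Pre_calculate_risk_score (differences : List (List (String × String))) : Prop :=
  ∀ diff ∈ differences,
    (PySem.Dict.mk diff).contains "type" = true ∧
    (((PySem.Dict.mk diff).getD "type" "" = "added" ∨
      (PySem.Dict.mk diff).getD "type" "" = "removed" ∨
      (PySem.Dict.mk diff).getD "type" "" = "modified") →
      (PySem.Dict.mk diff).contains "key" = true)
instance (differences : List (List (String × String))) : Decidable (Pre_calculate_risk_score differences) := by unfold Pre_calculate_risk_score; infer_instance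

def pvWitness_calculate_risk_score : (List (List (String × String))) :=
  [[("type", "added"), ("key", "Username")], [("type", "noted")]]

def Spec_calculate_risk_score (differences : List (List (String × String))) (out : Int) : Prop := out = calculate_risk_score_alt differences
instance (differences : List (List (String × String))) (out : Int) : Decidable (Spec_calculate_risk_score differences out) := by unfold Spec_calculate_risk_score; infer_instance

-- ===== CLAIM (what is proved, stated in full; the proofs are below) =====
def Claim_equal_calculate_risk_score : Prop := ∀ (differences : List (List (String × String))), Dom_calculate_risk_score differences → Pre_calculate_risk_score differences → Spec_calculate_risk_score differences (calculate_risk_score differences)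

-- ===== LEMMAS AND PROOFS =====

-- shorthand used only by the proofs: B's per-rule match count
def pvCnt (differences : List (List (String × String))) (rtype keyword : String) : Int :=
  differences.foldl (fun c diff => if pvMatches diff rtype keyword then c + 1 else c) 0

theorem pvCnt_from (differences : List (List (String × String))) (rtype keyword : String) (c : Int) :
    differences.foldl (fun c diff => if pvMatches diff rtype keyword then c + 1 else c) c
      = c + pvCnt differences rtype keyword := by
  induction differences generalizing c with
  | nil => simp [pvCnt]
  | cons d rest ih =>
      rw [List.foldl_cons, ih]
      conv_rhs => rw [pvCnt, List.foldl_cons, ih]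
      split_ifs <;> omega

theorem pvCnt_cons (d : List (String × String)) (rest : List (List (String × String)))
    (rtype keyword : String) :
    pvCnt (d :: rest) rtype keyword
      = (if pvMatches d rtype keyword then (1 : Int) else 0) + pvCnt rest rtype keyword := by
  rw [pvCnt, List.foldl_cons, pvCnt_from]
  split_ifs <;> omega

-- the three rule types are pairwise distinct, so at most one rule matches a diff
theorem pvMatches_excl (diff : List (String × String)) {t1 t2 kw1 kw2 : String}
    (hne : t1 ≠ t2) (h : pvMatches diff t1 kw1 = true) : pvMatches diff t2 kw2 = false := by
  unfold pvMatches at *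
  simp only [Bool.and_eq_true, beq_iff_eq] at h
  simp [h.1, hne]

-- A's loop body contributes the sum of the (at most one) matching rule's points
theorem pvStep_eq (s : Int) (d : List (String × String)) :
    (let dd := PySem.Dict.mk d
     if dd.getD "type" "" == "added" && PySem.Str.isIn "user" (PySem.Str.lower (dd.getD "key" "")) then
       s + 30
     else if dd.getD "type" "" == "removed" && PySem.Str.isIn "patch" (PySem.Str.lower (dd.getD "key" "")) then
       s + 50
     else if dd.getD "type" "" == "modified" && PySem.Str.isIn "port" (PySem.Str.lower (dd.getD "key" "")) then
       s + 20
     else s)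
    = s + (if pvMatches d "added" "user" then (30 : Int) else 0)
        + (if pvMatches d "removed" "patch" then (50 : Int) else 0)
        + (if pvMatches d "modified" "port" then (20 : Int) else 0) := by
  rw [show (let dd := PySem.Dict.mk d
    if dd.getD "type" "" == "added" && PySem.Str.isIn "user" (PySem.Str.lower (dd.getD "key" "")) then
      s + 30
    else if dd.getD "type" "" == "removed" && PySem.Str.isIn "patch" (PySem.Str.lower (dd.getD "key" "")) then
      s + 50
    else if dd.getD "type" "" == "modified" && PySem.Str.isIn "port" (PySem.Str.lower (dd.getD "key" "")) then
      s + 20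
    else s)
    = (if pvMatches d "added" "user" then s + 30
       else if pvMatches d "removed" "patch" then s + 50
       else if pvMatches d "modified" "port" then s + 20
       else s) from rfl]
  by_cases h1 : pvMatches d "added" "user"
  · have e2 := pvMatches_excl d (t2 := "removed") (kw2 := "patch") (by decide) h1
    have e3 := pvMatches_excl d (t2 := "modified") (kw2 := "port") (by decide) h1
    simp only [h1, e2, Bool.false_eq_true, e3, if_true, if_false]
    omega
  · have h1f : pvMatches d "added" "user" = false := by simpa using h1
    by_cases h2 : pvMatches d "removed" "patch"
    · have e3 := pvMatches_excl d (t2 := "modified") (kw2 := "port") (by decide) h2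
      simp only [h1f, h2, e3, Bool.false_eq_true, if_true, if_false]
      omega
    · have h2f : pvMatches d "removed" "patch" = false := by simpa using h2
      by_cases h3 : pvMatches d "modified" "port"
      · simp only [h1f, h2f, h3, Bool.false_eq_true, if_true, if_false]
        omega
      · have h3f : pvMatches d "modified" "port" = false := by simpa using h3
        simp only [h1f, h2f, h3f, Bool.false_eq_true, if_false]
        omega

-- A's fold equals the weighted sum of B's three counts
theorem pvFold_eq (differences : List (List (String × String))) (s : Int) :
    differences.foldl (fun score diff =>
      let dd := PySem.Dict.mk diff
      if dd.getD "type" "" == "added" && PySem.Str.isIn "user" (PySem.Str.lower (dd.getD "key" "")) then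
        score + 30
      else if dd.getD "type" "" == "removed" && PySem.Str.isIn "patch" (PySem.Str.lower (dd.getD "key" "")) then
        score + 50
      else if dd.getD "type" "" == "modified" && PySem.Str.isIn "port" (PySem.Str.lower (dd.getD "key" "")) then
        score + 20
      else score) s
    = s + 30 * pvCnt differences "added" "user"
        + 50 * pvCnt differences "removed" "patch"
        + 20 * pvCnt differences "modified" "port" := by
  induction differences generalizing s with
  | nil => simp [pvCnt]
  | cons d rest ih =>
      rw [List.foldl_cons, ih, pvStep_eq, pvCnt_cons, pvCnt_cons, pvCnt_cons]
      split_ifs <;> ring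

-- ===== VERDICT (by name: the statement is the Claim_ definition above) =====
theorem calculate_risk_score_spec : Claim_equal_calculate_risk_score := by
  intro differences _ _
  unfold Spec_calculate_risk_score calculate_risk_score calculate_risk_score_alt pvRiskRules
  simp only [List.map_cons, List.map_nil, List.sum_cons, List.sum_nil]
  rw [pvFold_eq]
  have hc : ∀ t kw : String,
      List.foldl (fun c diff => if pvMatches diff t kw then c + 1 else c) (0 : Int) differences
        = pvCnt differences t kw := fun _ _ => rfl
  rw [hc, hc, hc]
  congr 1
  ring
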